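-- pv_equiv track=rewrite | github.com/rmcreyes/cpen391-de1 | recognize.py | reorder_vertex_array
-- ===== SOURCE A (Python) =====
-- def separate_sides(vertex_array, index):
--     # get the indices of either the top corners or right corners
--     # 0 - top corners ; 1 - right corners
--
--     target_indices = []
--     max_value = float('-inf')
--     max_index = 0
--     for idx,a in enumerate(vertex_array):
--         if (a[index] > max_value):
--             max_index = idx
--             max_value = a[index]
--
--     target_indices.append(max_index)
--
--     max_value = float('-inf')
--     for idx,a in enumerate(vertex_array):
--         if (a[index] > max_value) and (idx not in target_indices):
--             max_index = idx
--             max_value = a[index]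
--
--     target_indices.append(max_index)
--
--
--     return target_indices
--
-- def reorder_vertex_array(vertex_array):
--     # reorder the array of vertices to prepare to a re-skewing of image
--
--     topleft_index = 0
--     topright_index = 0
--     bottomleft_index = 0
--     bottomright_index = 0
--
--     top_indices = []
--     bottom_indices = []
--
--     top_indices = separate_sides(vertex_array, 1)
--     right_indices = separate_sides(vertex_array, 0)
--
--     for idx in range(len(vertex_array)):
--         if (idx in top_indices):
--             if (idx in right_indices):
--                 topright_index = idx
--             else:
--                 topleft_index = idx
--         else:
--             if (idx in right_indices):
--                 bottomright_index = idx
--             else: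
--                 bottomleft_index = idx
--
--     # should be in the order:
--     #  4 ---- 3
--     #  |      |
--     #  1 ---- 2
--
--
--     vertex_array_rearranged = [vertex_array[i] for i in [bottomleft_index, bottomright_index,topright_index, topleft_index]]
--
--
--     return vertex_array_rearranged
-- ===== SOURCE B (Python) =====
-- def reorder_vertex_array(vertex_array):
--     # Different strategy: one-pass best/second-best selection per coordinate
--     # (instead of two rescans), then a back-to-front search per corner class
--     # (instead of the forward bucket-assignment loop).
--     n = len(vertex_array)
--
--     def top_two(coord):
--         # single pass keeping the two largest (value, -index) keys
--         best = None
--         second = None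
--         for i, p in enumerate(vertex_array):
--             k = (p[coord], -i)
--             if best is None or k > best:
--                 best, second = k, best
--             elif second is None or k > second:
--                 second = k
--         b = -best[1] if best is not None else 0
--         s = -second[1] if second is not None else b
--         return {b, s}
--
--     top = top_two(1)
--     right = top_two(0)
--
--     def last_where(in_top, in_right):
--         # highest index falling in this corner class, 0 if none
--         for i in range(n - 1, -1, -1):
--             if (i in top) == in_top and (i in right) == in_right:
--                 return i
--         return 0
--
--     order = [last_where(False, False), last_where(False, True),
--              last_where(True, True), last_where(True, False)]
--     return [vertex_array[i] for i in order]
-- ===== Notes on version B (the rewrite author's own statement) =====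
-- stated objective: alternative
-- what changed: B finds each side's two extreme indices in a single pass that maintains a best/second-best (value, -index) key pair instead of A's two full rescans per side, and assigns the four corners by a back-to-front search per corner class instead of A's forward bucket-classification loop over four mutable slots.
import Mathlib
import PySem

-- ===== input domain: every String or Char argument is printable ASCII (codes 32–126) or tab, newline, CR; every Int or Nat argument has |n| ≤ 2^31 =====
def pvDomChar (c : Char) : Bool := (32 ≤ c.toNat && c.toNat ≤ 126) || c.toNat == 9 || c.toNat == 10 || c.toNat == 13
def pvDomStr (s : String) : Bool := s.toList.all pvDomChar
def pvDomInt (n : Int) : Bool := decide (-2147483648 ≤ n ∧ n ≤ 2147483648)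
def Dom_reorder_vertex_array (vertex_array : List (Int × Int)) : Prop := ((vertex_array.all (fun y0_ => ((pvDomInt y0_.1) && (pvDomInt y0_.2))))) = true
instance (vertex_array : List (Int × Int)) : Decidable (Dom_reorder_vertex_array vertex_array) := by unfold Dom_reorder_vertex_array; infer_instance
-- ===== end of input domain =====

-- B replaces A's two rescan-based max searches per side by a one-pass best/second-best
-- selection and the forward bucket loop by a back-to-front search per corner class (alternative, same cost).

-- ===== PORT A =====

-- a[index] for index ∈ {0, 1} (the only values the Python uses)
def pvCoord (a : Int × Int) (index : Int) : Int := if index = 0 then a.1 else a.2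

-- 'a[index] > max_value' where max_value starts at float('-inf'): none is strictly below every Int
def pvGtOpt (mv : Option Int) (v : Int) : Bool := match mv with | none => true | some m => decide (m < v)

-- body of A's first scan (state = (max_value, max_index))
def pvStep1 (index : Int) (st : Option Int × Int) (ia : Int × (Int × Int)) : Option Int × Int :=
  if pvGtOpt st.1 (pvCoord ia.2 index) then (some (pvCoord ia.2 index), ia.1) else st

-- body of A's second scan ('… and (idx not in target_indices)')
def pvStep2 (index : Int) (excl : List Int) (st : Option Int × Int) (ia : Int × (Int × Int)) : Option Int × Int :=
  if pvGtOpt st.1 (pvCoord ia.2 index) && !(excl.contains ia.1) then (some (pvCoord ia.2 index), ia.1) else st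

def separate_sides (vertex_array : List (Int × Int)) (index : Int) : List Int :=
  let s1 := (PySem.List.enumerate vertex_array).foldl (pvStep1 index) (none, 0)
  let target_indices : List Int := [s1.2]
  let s2 := (PySem.List.enumerate vertex_array).foldl (pvStep2 index target_indices) (none, s1.2)
  target_indices ++ [s2.2]

def reorder_vertex_array (vertex_array : List (Int × Int)) : List (Int × Int) :=
  let top_indices := separate_sides vertex_array 1
  let right_indices := separate_sides vertex_array 0
  -- state (topleft_index, topright_index, bottomleft_index, bottomright_index), all starting at 0
  let st := (PySem.List.pyRange 0 (vertex_array.length : Int) 1).foldl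
    (fun (st : Int × Int × Int × Int) (idx : Int) =>
      if top_indices.contains idx then
        (if right_indices.contains idx then (st.1, idx, st.2.2.1, st.2.2.2)
         else (idx, st.2.1, st.2.2.1, st.2.2.2))
      else
        (if right_indices.contains idx then (st.1, st.2.1, st.2.2.1, idx)
         else (st.1, st.2.1, idx, st.2.2.2)))
    (0, 0, 0, 0)
  -- Python indexes vertex_array[i]; IndexError only for vertex_array = [] (excluded by Pre_)
  [st.2.2.1, st.2.2.2, st.2.1, st.1].map (fun i => PySem.List.pyGetD vertex_array i (0, 0))

-- ===== PORT B =====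

-- Python '>' on 2-tuples of ints (lexicographic)
def pvKeyGt (a b : Int × Int) : Bool := decide (b.1 < a.1) || (a.1 == b.1 && decide (b.2 < a.2))

-- body of B's single pass: state = (best, second), keys are (value, -index)
def pvStepB (coord : Int) (st : Option (Int × Int) × Option (Int × Int)) (ip : Int × (Int × Int)) :
    Option (Int × Int) × Option (Int × Int) :=
  let k : Int × Int := (pvCoord ip.2 coord, -ip.1)
  match st with
  | (none, second) => (some k, second)
  | (some b, second) =>
    if pvKeyGt k b then (some k, some b)
    else match second with
      | none => (some b, some k)
      | some s => if pvKeyGt k s then (some b, some k) else (some b, some s)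

def pvTopTwo (vertex_array : List (Int × Int)) (coord : Int) : PySem.Set Int :=
  let st := (PySem.List.enumerate vertex_array).foldl (pvStepB coord) (none, none)
  let b : Int := match st.1 with | some bk => -bk.2 | none => 0
  let s : Int := match st.2 with | some sk => -sk.2 | none => b
  PySem.Set.ofList [b, s]

def pvLastWhere (n : Int) (top right : PySem.Set Int) (inTop inRight : Bool) : Int :=
  ((PySem.List.pyRange (n - 1) (-1) (-1)).find? (fun i =>
      (PySem.Set.contains top i == inTop) && (PySem.Set.contains right i == inRight))).getD 0

def reorder_vertex_array_alt (vertex_array : List (Int × Int)) : List (Int × Int) :=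
  let n : Int := (vertex_array.length : Int)
  let top := pvTopTwo vertex_array 1
  let right := pvTopTwo vertex_array 0
  [pvLastWhere n top right false false, pvLastWhere n top right false true,
   pvLastWhere n top right true true, pvLastWhere n top right true false].map
    (fun i => PySem.List.pyGetD vertex_array i (0, 0))

-- ===== PRECONDITION & SPEC =====
-- Python A raises IndexError on the empty list (vertex_array[0] at the end); excluded.
def Pre_reorder_vertex_array (vertex_array : List (Int × Int)) : Prop := vertex_array ≠ []
instance (vertex_array : List (Int × Int)) : Decidable (Pre_reorder_vertex_array vertex_array) := by unfold Pre_reorder_vertex_array; infer_instance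

def pvWitness_reorder_vertex_array : (List (Int × Int)) := [(-1, 2), (3, 4), (0, 0), (2, -2)]

def Spec_reorder_vertex_array (vertex_array : List (Int × Int)) (out : List (Int × Int)) : Prop := out = reorder_vertex_array_alt vertex_array
instance (vertex_array : List (Int × Int)) (out : List (Int × Int)) : Decidable (Spec_reorder_vertex_array vertex_array out) := by unfold Spec_reorder_vertex_array; infer_instance

-- ===== CLAIM (what is proved, stated in full; the proofs are below) =====
def Claim_equal_reorder_vertex_array : Prop := ∀ (vertex_array : List (Int × Int)), Dom_reorder_vertex_array vertex_array → Pre_reorder_vertex_array vertex_array → Spec_reorder_vertex_array vertex_array (reorder_vertex_array vertex_array)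

-- ===== LEMMAS AND PROOFS =====

-- '(i, a) beats p' under the key order (value first, then smaller index)
def pvBeats (c : Int) (i : Int) (a : Int × Int) (p : Int × (Int × Int)) : Prop :=
  pvCoord p.2 c < pvCoord a c ∨ (pvCoord p.2 c = pvCoord a c ∧ i ≤ p.1)

theorem pv_enum_fst_lt (va : List (Int × Int)) (p : Int × (Int × Int))
    (hp : p ∈ PySem.List.enumerate va) : 0 ≤ p.1 ∧ p.1 < (va.length : Int) := by
  rw [PySem.List.mem_enumerate_iff] at hp
  obtain ⟨k, hk, rfl⟩ := hp
  refine ⟨?_, ?_⟩ <;> simp <;> omega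

theorem pv_enum_append (t : List (Int × Int)) (x : Int × Int) :
    PySem.List.enumerate (t ++ [x]) = PySem.List.enumerate t ++ [((t.length : Int), x)] := by
  rw [PySem.List.enumerate_append]
  simp [PySem.List.enumerate_cons, PySem.List.enumerate_nil]

theorem pv_enum_snd_unique (va : List (Int × Int)) {i : Int} {a b : Int × Int}
    (ha : (i, a) ∈ PySem.List.enumerate va) (hb : (i, b) ∈ PySem.List.enumerate va) : a = b := by
  rw [PySem.List.mem_enumerate_iff] at ha hb
  obtain ⟨k, hk, hka⟩ := ha; obtain ⟨k', hk', hkb⟩ := hb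
  rw [Prod.ext_iff] at hka hkb
  obtain ⟨h1, h2⟩ := hka; obtain ⟨h1', h2'⟩ := hkb
  simp at h1 h1' h2 h2'
  have : k = k' := by omega
  subst this; rw [h2, h2']

theorem pv_beats_unique (c : Int) (E : List (Int × (Int × Int))) (Q : Int → Prop)
    {i j : Int} {a b : Int × Int}
    (hi : (i, a) ∈ E) (hQi : Q i) (hj : (j, b) ∈ E) (hQj : Q j)
    (h1 : ∀ p ∈ E, Q p.1 → pvBeats c i a p) (h2 : ∀ p ∈ E, Q p.1 → pvBeats c j b p) : i = j := by
  have A := h1 (j, b) hj hQj; have B := h2 (i, a) hi hQi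
  simp only [pvBeats] at A B
  omega

theorem pv_scan1_spec (va : List (Int × Int)) (c : Int) :
    (va = [] → (PySem.List.enumerate va).foldl (pvStep1 c) (none, 0) = (none, 0)) ∧
    (va ≠ [] → ∃ i a, (i, a) ∈ PySem.List.enumerate va ∧
      (PySem.List.enumerate va).foldl (pvStep1 c) (none, 0) = (some (pvCoord a c), i) ∧
      ∀ p ∈ PySem.List.enumerate va, pvBeats c i a p) := by
  induction va using List.reverseRecOn with
  | nil =>
    exact ⟨fun _ => by simp [PySem.List.enumerate_nil], fun h => absurd rfl h⟩
  | append_singleton t x ih =>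
    refine ⟨by simp, fun _ => ?_⟩
    rw [pv_enum_append, List.foldl_append]
    rcases eq_or_ne t [] with rfl | ht
    · simp only [PySem.List.enumerate_nil, List.foldl_nil, List.foldl_cons,
        List.length_nil, Nat.cast_zero, List.nil_append]
      refine ⟨0, x, by simp, ?_, ?_⟩
      · simp [pvStep1, pvGtOpt]
      · intro p hp; simp at hp; subst hp; simp [pvBeats]
    · obtain ⟨i, a, hmem, hres, hdom⟩ := ih.2 ht
      have hibd := pv_enum_fst_lt t _ hmem
      rw [hres]
      by_cases hgt : pvCoord a c < pvCoord x c
      · refine ⟨(t.length : Int), x, by simp, ?_, ?_⟩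
        · simp [pvStep1, pvGtOpt, hgt]
        · intro p hp
          simp only [pvBeats] at hdom ⊢
          rcases List.mem_append.mp hp with h | h
          · have := hdom p h; omega
          · simp at h; subst h; dsimp only; omega
      · refine ⟨i, a, List.mem_append_left _ hmem, ?_, ?_⟩
        · simp [pvStep1, pvGtOpt, hgt]
        · intro p hp
          simp only [pvBeats] at hdom ⊢
          rcases List.mem_append.mp hp with h | h
          · exact hdom p h
          · simp at h; subst h; dsimp only; omega

theorem pv_scan2_spec (va : List (Int × Int)) (c m1 : Int) :
    ((∀ p ∈ PySem.List.enumerate va, p.1 = m1) →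
      (PySem.List.enumerate va).foldl (pvStep2 c [m1]) (none, m1) = (none, m1)) ∧
    ((∃ p ∈ PySem.List.enumerate va, p.1 ≠ m1) → ∃ i a, (i, a) ∈ PySem.List.enumerate va ∧ i ≠ m1 ∧
      (PySem.List.enumerate va).foldl (pvStep2 c [m1]) (none, m1) = (some (pvCoord a c), i) ∧
      ∀ p ∈ PySem.List.enumerate va, p.1 ≠ m1 → pvBeats c i a p) := by
  induction va using List.reverseRecOn with
  | nil =>
    refine ⟨fun _ => by simp [PySem.List.enumerate_nil], fun h => ?_⟩
    obtain ⟨p, hp, _⟩ := h; simp [PySem.List.enumerate_nil] at hp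
  | append_singleton t x ih =>
    rw [pv_enum_append]
    constructor
    · intro hall
      rw [List.foldl_append]
      have hallt : ∀ p ∈ PySem.List.enumerate t, p.1 = m1 :=
        fun p hp => hall p (List.mem_append_left _ hp)
      have hx : ((t.length : Int)) = m1 := hall ((t.length : Int), x) (by simp)
      rw [ih.1 hallt]
      simp [pvStep2, hx]
    · intro hex
      rw [List.foldl_append]
      by_cases hexold : ∃ p ∈ PySem.List.enumerate t, p.1 ≠ m1
      · obtain ⟨i, a, hmem, hne, hres, hdom⟩ := ih.2 hexold
        have hibd := pv_enum_fst_lt t _ hmem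
        rw [hres]
        by_cases hxm : ((t.length : Int)) = m1
        · refine ⟨i, a, List.mem_append_left _ hmem, hne, ?_, ?_⟩
          · simp [pvStep2, hxm]
          · intro p hp hpne
            rcases List.mem_append.mp hp with h | h
            · exact hdom p h hpne
            · simp at h; subst h; simp [hxm] at hpne
        · by_cases hgt : pvCoord a c < pvCoord x c
          · refine ⟨(t.length : Int), x, by simp, hxm, ?_, ?_⟩
            · simp [pvStep2, pvGtOpt, hgt, hxm]
            · intro p hp hpne
              simp only [pvBeats] at hdom ⊢
              rcases List.mem_append.mp hp with h | h
              · have := hdom p h hpne; omega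
              · simp at h; subst h; dsimp only; omega
          · refine ⟨i, a, List.mem_append_left _ hmem, hne, ?_, ?_⟩
            · simp [pvStep2, pvGtOpt, hgt]
            · intro p hp hpne
              simp only [pvBeats] at hdom ⊢
              rcases List.mem_append.mp hp with h | h
              · exact hdom p h hpne
              · simp at h; subst h; dsimp only; omega
      · push_neg at hexold
        rw [ih.1 hexold]
        by_cases hxm : ((t.length : Int)) = m1
        · exfalso
          obtain ⟨p, hp, hpne⟩ := hex
          rcases List.mem_append.mp hp with h | h
          · exact hpne (hexold p h)
          · simp at h; subst h; exact hpne hxm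
        · refine ⟨(t.length : Int), x, by simp, hxm, ?_, ?_⟩
          · simp [pvStep2, pvGtOpt, hxm]
          · intro p hp hpne
            rcases List.mem_append.mp hp with h | h
            · exact absurd (hexold p h) hpne
            · simp at h; subst h; simp [pvBeats]

theorem pv_scanB_spec (va : List (Int × Int)) (c : Int) :
    (va = [] → (PySem.List.enumerate va).foldl (pvStepB c) (none, none) = (none, none)) ∧
    (va ≠ [] → ∃ i a, (i, a) ∈ PySem.List.enumerate va ∧
      ((PySem.List.enumerate va).foldl (pvStepB c) (none, none)).1 = some (pvCoord a c, -i) ∧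
      (∀ p ∈ PySem.List.enumerate va, pvBeats c i a p) ∧
      ((∀ p ∈ PySem.List.enumerate va, p.1 = i) →
        ((PySem.List.enumerate va).foldl (pvStepB c) (none, none)).2 = none) ∧
      ((∃ p ∈ PySem.List.enumerate va, p.1 ≠ i) → ∃ j b, (j, b) ∈ PySem.List.enumerate va ∧ j ≠ i ∧
        ((PySem.List.enumerate va).foldl (pvStepB c) (none, none)).2 = some (pvCoord b c, -j) ∧
        ∀ p ∈ PySem.List.enumerate va, p.1 ≠ i → pvBeats c j b p)) := by
  induction va using List.reverseRecOn with
  | nil =>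
    exact ⟨fun _ => by simp [PySem.List.enumerate_nil], fun h => absurd rfl h⟩
  | append_singleton t x ih =>
    refine ⟨by simp, fun _ => ?_⟩
    rw [pv_enum_append, List.foldl_append]
    rcases eq_or_ne t [] with rfl | ht
    · simp only [PySem.List.enumerate_nil, List.foldl_nil, List.foldl_cons,
        List.length_nil, Nat.cast_zero, List.nil_append]
      refine ⟨0, x, by simp, ?_, ?_, fun _ => ?_, ?_⟩
      · simp [pvStepB]
      · intro p hp; simp at hp; subst hp; simp [pvBeats]
      · simp [pvStepB]
      · intro hex; exfalso
        obtain ⟨p, hp, hpne⟩ := hex; simp at hp; subst hp; simp at hpne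
    · obtain ⟨i, a, hmem, hb, hdom, hsnone, hssome⟩ := ih.2 ht
      have hibd := pv_enum_fst_lt t _ hmem
      cases hst : (PySem.List.enumerate t).foldl (pvStepB c) (none, none) with
      | mk st1 st2 =>
        rw [hst] at hb hsnone hssome
        simp only at hb hsnone hssome
        subst hb
        have hkey : (pvKeyGt (pvCoord x c, -((t.length : Int))) (pvCoord a c, -i) = true)
            ↔ pvCoord a c < pvCoord x c := by
          simp [pvKeyGt]; omega
        by_cases hgt : pvCoord a c < pvCoord x c
        · refine ⟨(t.length : Int), x, by simp, ?_, ?_, ?_, ?_⟩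
          · simp [pvStepB, hkey, hgt]
          · intro p hp
            simp only [pvBeats] at hdom ⊢
            rcases List.mem_append.mp hp with h | h
            · have := hdom p h; omega
            · simp at h; subst h; dsimp only; omega
          · intro hall; exfalso
            have := hall (i, a) (List.mem_append_left _ hmem)
            simp at this; omega
          · intro _
            refine ⟨i, a, List.mem_append_left _ hmem, by omega, ?_, ?_⟩
            · simp [pvStepB, hkey, hgt]
            · intro p hp hpne
              rcases List.mem_append.mp hp with h | h
              · exact hdom p h
              · simp at h; subst h; simp at hpne
        · cases st2 with
          | none =>
            have hall_old : ∀ p ∈ PySem.List.enumerate t, p.1 = i := by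
              by_contra hco; push_neg at hco
              obtain ⟨j, b2, _, _, hcontra, _⟩ := hssome hco
              simp at hcontra
            refine ⟨i, a, List.mem_append_left _ hmem, ?_, ?_, ?_, ?_⟩
            · simp [pvStepB, hkey, hgt]
            · intro p hp
              simp only [pvBeats] at hdom ⊢
              rcases List.mem_append.mp hp with h | h
              · exact hdom p h
              · simp at h; subst h; dsimp only; omega
            · intro hall; exfalso
              have := hall ((t.length : Int), x) (by simp)
              omega
            · intro _
              refine ⟨(t.length : Int), x, by simp, by omega, ?_, ?_⟩
              · simp [pvStepB, hkey, hgt]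
              · intro p hp hpne
                rcases List.mem_append.mp hp with h | h
                · exact absurd (hall_old p h) hpne
                · simp at h; subst h; simp [pvBeats]
          | some s =>
            have hexold : ∃ p ∈ PySem.List.enumerate t, p.1 ≠ i := by
              by_contra hco; push_neg at hco
              have := hsnone hco; simp at this
            obtain ⟨j, b2, hjmem, hjne, hsnd, hjdom⟩ := hssome hexold
            have hjbd := pv_enum_fst_lt t _ hjmem
            rw [Option.some.injEq] at hsnd
            subst hsnd
            have hkey2 : (pvKeyGt (pvCoord x c, -((t.length : Int))) (pvCoord b2 c, -j) = true)
                ↔ pvCoord b2 c < pvCoord x c := by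
              simp [pvKeyGt]; omega
            by_cases hgt2 : pvCoord b2 c < pvCoord x c
            · refine ⟨i, a, List.mem_append_left _ hmem, ?_, ?_, ?_, ?_⟩
              · simp [pvStepB, hkey, hgt, hkey2, hgt2]
              · intro p hp
                simp only [pvBeats] at hdom ⊢
                rcases List.mem_append.mp hp with h | h
                · exact hdom p h
                · simp at h; subst h; dsimp only; omega
              · intro hall; exfalso
                exact hjne (hall (j, b2) (List.mem_append_left _ hjmem))
              · intro _
                refine ⟨(t.length : Int), x, by simp, by omega, ?_, ?_⟩
                · simp [pvStepB, hkey, hgt, hkey2, hgt2]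
                · intro p hp hpne
                  simp only [pvBeats] at hjdom ⊢
                  rcases List.mem_append.mp hp with h | h
                  · have := hjdom p h (by simpa using hpne); omega
                  · simp at h; subst h; dsimp only; omega
            · refine ⟨i, a, List.mem_append_left _ hmem, ?_, ?_, ?_, ?_⟩
              · simp [pvStepB, hkey, hgt, hkey2, hgt2]
              · intro p hp
                simp only [pvBeats] at hdom ⊢
                rcases List.mem_append.mp hp with h | h
                · exact hdom p h
                · simp at h; subst h; dsimp only; omega
              · intro hall; exfalso
                exact hjne (hall (j, b2) (List.mem_append_left _ hjmem))
              · intro _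
                refine ⟨j, b2, List.mem_append_left _ hjmem, hjne, ?_, ?_⟩
                · simp [pvStepB, hkey, hgt, hkey2, hgt2]
                · intro p hp hpne
                  simp only [pvBeats] at hjdom ⊢
                  rcases List.mem_append.mp hp with h | h
                  · exact hjdom p h (by simpa using hpne)
                  · simp at h; subst h; dsimp only; omega

-- the two side computations agree: B's set is exactly set(A's two indices)
theorem pv_sides_eq (va : List (Int × Int)) (hva : va ≠ []) (c : Int) :
    pvTopTwo va c = PySem.Set.ofList (separate_sides va c) := by
  obtain ⟨i, a, hmem, hres1, hdom1⟩ := (pv_scan1_spec va c).2 hva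
  obtain ⟨i', a', hmem', hb', hdom', hsnone, hssome⟩ := (pv_scanB_spec va c).2 hva
  have hii : i = i' := by
    refine pv_beats_unique c _ (fun _ => True) hmem trivial hmem' trivial ?_ ?_
    · exact fun p hp _ => hdom1 p hp
    · exact fun p hp _ => hdom' p hp
  subst hii
  by_cases hex : ∃ p ∈ PySem.List.enumerate va, p.1 ≠ i
  · obtain ⟨i2, a2, hmem2, hne2, hres2, hdom2⟩ := (pv_scan2_spec va c i).2 hex
    obtain ⟨j, b2, hjmem, hjne, hsnd, hjdom⟩ := hssome hex
    have hjj : j = i2 := pv_beats_unique c _ (fun z => z ≠ i) hjmem hjne hmem2 hne2 hjdom hdom2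
    subst hjj
    have hba : b2 = a2 := pv_enum_snd_unique va hjmem hmem2
    subst hba
    simp [pvTopTwo, separate_sides, hres1, hres2, hb', hsnd]
  · push_neg at hex
    have h1 := (pv_scan2_spec va c i).1 hex
    have h2 := hsnone hex
    simp [pvTopTwo, separate_sides, hres1, h1, hb', h2]

-- A's 4-slot classification fold splits into four independent folds
theorem pv_foldl4 (tI rI : List Int) (l : List Int) (st : Int × Int × Int × Int) :
    l.foldl (fun (st : Int × Int × Int × Int) (idx : Int) =>
      if tI.contains idx then
        (if rI.contains idx then (st.1, idx, st.2.2.1, st.2.2.2)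
         else (idx, st.2.1, st.2.2.1, st.2.2.2))
      else
        (if rI.contains idx then (st.1, st.2.1, st.2.2.1, idx)
         else (st.1, st.2.1, idx, st.2.2.2))) st
    = (l.foldl (fun a i => if (tI.contains i == true) && (rI.contains i == false) then i else a) st.1,
       l.foldl (fun a i => if (tI.contains i == true) && (rI.contains i == true) then i else a) st.2.1,
       l.foldl (fun a i => if (tI.contains i == false) && (rI.contains i == false) then i else a) st.2.2.1,
       l.foldl (fun a i => if (tI.contains i == false) && (rI.contains i == true) then i else a) st.2.2.2) := by
  induction l generalizing st with
  | nil => rfl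
  | cons x t ih =>
    obtain ⟨a, b, cc, dd⟩ := st
    simp only [List.foldl_cons]
    rw [ih]
    cases h1 : tI.contains x <;> cases h2 : rI.contains x <;> simp [h1, h2]

theorem pv_foldl4_list (tI rI : List Int) (l : List Int) :
    (let st := l.foldl (fun (st : Int × Int × Int × Int) (idx : Int) =>
      if tI.contains idx then
        (if rI.contains idx then (st.1, idx, st.2.2.1, st.2.2.2)
         else (idx, st.2.1, st.2.2.1, st.2.2.2))
      else
        (if rI.contains idx then (st.1, st.2.1, st.2.2.1, idx)
         else (st.1, st.2.1, idx, st.2.2.2))) ((0 : Int), (0 : Int), (0 : Int), (0 : Int))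
     [st.2.2.1, st.2.2.2, st.2.1, st.1])
    = [l.foldl (fun a i => if (tI.contains i == false) && (rI.contains i == false) then i else a) 0,
       l.foldl (fun a i => if (tI.contains i == false) && (rI.contains i == true) then i else a) 0,
       l.foldl (fun a i => if (tI.contains i == true) && (rI.contains i == true) then i else a) 0,
       l.foldl (fun a i => if (tI.contains i == true) && (rI.contains i == false) then i else a) 0] := by
  rw [pv_foldl4]

-- a 'last index satisfying p' fold is a find? on the reversed list
theorem pv_foldl_if_eq_find_reverse (p : Int → Bool) (l : List Int) (d : Int) :
    l.foldl (fun a i => if p i then i else a) d = (l.reverse.find? p).getD d := by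
  induction l generalizing d with
  | nil => simp
  | cons x t ih =>
    simp only [List.foldl_cons, List.reverse_cons, List.find?_append]
    rw [ih]
    cases hf : t.reverse.find? p with
    | none => cases hp : p x <;> simp [hf, hp, List.find?]
    | some y => simp [hf]

theorem pv_contains_ofList (l : List Int) (x : Int) :
    PySem.Set.contains (PySem.Set.ofList l) x = l.contains x := by
  by_cases h : x ∈ l <;> simp [PySem.Set.contains_iff, PySem.Set.mem_ofList, h]

-- ===== VERDICT (by name: the statement is the Claim_ definition above) =====
theorem reorder_vertex_array_spec : Claim_equal_reorder_vertex_array := by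
  intro va _ hpre
  unfold Spec_reorder_vertex_array
  have htop := pv_sides_eq va hpre 1
  have hright := pv_sides_eq va hpre 0
  have slot : ∀ bt br : Bool,
      (PySem.List.pyRange 0 (va.length : Int) 1).foldl
        (fun a i => if ((separate_sides va 1).contains i == bt) && ((separate_sides va 0).contains i == br) then i else a) (0 : Int)
      = pvLastWhere ((va.length : Int)) (pvTopTwo va 1) (pvTopTwo va 0) bt br := by
    intro bt br
    rw [pv_foldl_if_eq_find_reverse]
    have hrange : PySem.List.pyRange ((va.length : Int) - 1) (-1) (-1)
        = (PySem.List.pyRange 0 (va.length : Int) 1).reverse := by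
      rw [PySem.List.pyRange_neg_one_eq_reverse]
      norm_num
    simp only [pvLastWhere, hrange]
    congr 2
    funext i
    rw [htop, hright, pv_contains_ofList, pv_contains_ofList]
  simp only [reorder_vertex_array, reorder_vertex_array_alt]
  rw [pv_foldl4_list, slot false false, slot false true, slot true true, slot true false]
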